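-- pv_equiv track=rewrite | github.com/WilliamXu070/Genai_2026 | langflow_orchestrator/pipeline/openai_execution_agent.py | _inject_required_interactions
-- ===== SOURCE A (Python) =====
-- from typing import Any, Dict, List
--
-- def _step_matches(step: Dict[str, Any], action: str, target: str) -> bool:
--   return str(step.get("action", "")).strip().lower() == action.lower() and str(step.get("target", "")).strip() == target
--
-- def _inject_required_interactions(steps: List[Dict[str, Any]], required: List[Dict[str, Any]]) -> List[Dict[str, Any]]:
--   normalized_steps = list(steps or [])
--   insert_index = 0
--   for idx, step in enumerate(normalized_steps):
--     if str(step.get("action", "")).strip().lower() == "goto":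
--       insert_index = idx + 1
--       break
--
--   for interaction in required:
--     action = str(interaction.get("action", "")).strip()
--     target = str(interaction.get("target", "")).strip()
--     if not action or not target:
--       continue
--     if any(_step_matches(step, action, target) for step in normalized_steps):
--       continue
--
--     normalized_steps.insert(insert_index, {"action": action, "target": target})
--     insert_index += 1
--   return normalized_steps
-- ===== SOURCE B (Python) =====
-- from typing import Any, Dict, List
--
-- def _inject_required_interactions(steps: List[Dict[str, Any]], required: List[Dict[str, Any]]) -> List[Dict[str, Any]]:
--   steps = list(steps or [])
--
--   def _key(d):
--     return (str(d.get("action", "")).strip().lower(), str(d.get("target", "")).strip())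
--
--   def _valid(d):
--     return bool(str(d.get("action", "")).strip()) and bool(str(d.get("target", "")).strip())
--
--   step_keys = [_key(s) for s in steps]
--   missing = [
--     {"action": str(r.get("action", "")).strip(), "target": str(r.get("target", "")).strip()}
--     for i, r in enumerate(required)
--     if _valid(r)
--     and _key(r) not in step_keys
--     and all(not _valid(q) or _key(q) != _key(r) for q in required[:i])
--   ]
--
--   out = []
--   it = iter(steps)
--   for step in it:
--     out.append(step)
--     if str(step.get("action", "")).strip().lower() == "goto":
--       out.extend(missing)
--       out.extend(it)
--       return out
--   return missing + out
-- ===== Notes on version B (the rewrite author's own statement) =====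
-- stated objective: alternative
-- what changed: A maintains a mutable insert_index and repeatedly inserts into the growing steps list, re-scanning it for duplicates each time; B computes the missing interactions declaratively as one comprehension over required (dedup by an all-earlier-entries check and a precomputed key list, no running state), then emits the result in a single scan over steps that splices the missing block right after the first goto (or prepends it if none).
import Mathlib
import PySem

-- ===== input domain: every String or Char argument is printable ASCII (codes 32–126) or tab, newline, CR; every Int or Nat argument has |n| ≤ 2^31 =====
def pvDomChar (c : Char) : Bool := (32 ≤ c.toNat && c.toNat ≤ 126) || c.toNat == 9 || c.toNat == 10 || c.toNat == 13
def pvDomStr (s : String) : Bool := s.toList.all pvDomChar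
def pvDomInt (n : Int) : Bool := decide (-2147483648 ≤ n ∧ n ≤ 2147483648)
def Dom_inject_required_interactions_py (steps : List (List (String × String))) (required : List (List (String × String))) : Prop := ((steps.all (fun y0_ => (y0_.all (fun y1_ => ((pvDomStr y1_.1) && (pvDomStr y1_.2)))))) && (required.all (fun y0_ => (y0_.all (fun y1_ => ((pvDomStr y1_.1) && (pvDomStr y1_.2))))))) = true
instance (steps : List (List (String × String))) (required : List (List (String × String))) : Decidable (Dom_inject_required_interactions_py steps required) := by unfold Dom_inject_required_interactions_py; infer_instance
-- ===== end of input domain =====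

-- B computes the missing interactions declaratively (one comprehension with an all-earlier-duplicates
-- check) and splices them after the first 'goto' in a single emitting scan, instead of A's stateful
-- insert_index bookkeeping with repeated in-place inserts and rescans; same return value (alternative).


-- shared helper: dict.get(k, "") on an association list (first match, default "")
def pvDictGet (d : List (String × String)) (k : String) : String :=
  match d with
  | [] => ""
  | (k', v) :: rest => if k' == k then v else pvDictGet rest k

-- ===== PORT A =====
-- A's first loop: index after the first 'goto' step, else 0
def pvFindGoto (steps : List (List (String × String))) (idx : Nat) : Nat :=
  match steps with
  | [] => 0
  | s :: rest =>
    if PySem.Str.lower (PySem.Str.strip (pvDictGet s "action")) == "goto" then idx + 1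
    else pvFindGoto rest (idx + 1)

-- _step_matches
def pvStepMatches (step : List (String × String)) (action target : String) : Bool :=
  (PySem.Str.lower (PySem.Str.strip (pvDictGet step "action")) == PySem.Str.lower action) &&
  (PySem.Str.strip (pvDictGet step "target") == target)

-- A's second loop: state = (normalized_steps, insert_index)
def pvInjectLoopA (required : List (List (String × String))) (ns : List (List (String × String))) (i : Nat) : List (List (String × String)) :=
  match required with
  | [] => ns
  | interaction :: rest =>
    let action := PySem.Str.strip (pvDictGet interaction "action")
    let target := PySem.Str.strip (pvDictGet interaction "target")
    if action == "" || target == "" then pvInjectLoopA rest ns i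
    else if ns.any (fun step => pvStepMatches step action target) then pvInjectLoopA rest ns i
    else pvInjectLoopA rest (PySem.List.insert ns (i : Int) [("action", action), ("target", target)]) (i + 1)

def inject_required_interactions_py (steps : List (List (String × String))) (required : List (List (String × String))) : List (List (String × String)) :=
  pvInjectLoopA required steps (pvFindGoto steps 0)

-- ===== PORT B =====
-- B's _key: (action stripped+lowered, target stripped)
def pvKey (s : List (String × String)) : String × String :=
  (PySem.Str.lower (PySem.Str.strip (pvDictGet s "action")), PySem.Str.strip (pvDictGet s "target"))

-- B's _valid: both stripped fields non-empty
def pvValid (d : List (String × String)) : Bool :=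
  !(PySem.Str.strip (pvDictGet d "action") == "") && !(PySem.Str.strip (pvDictGet d "target") == "")

-- B's comprehension: missing = [entry(r) for i, r in enumerate(required) if _valid(r)
--   and _key(r) not in step_keys and all(not _valid(q) or _key(q) != _key(r) for q in required[:i])]
def pvMissing (stepKeys : List (String × String)) (required : List (List (String × String))) : List (List (String × String)) :=
  (PySem.List.enumerate required).filterMap (fun p =>
    if pvValid p.2 && !(stepKeys.contains (pvKey p.2))
        && ((PySem.List.slice required none (some p.1)).all fun q => !pvValid q || pvKey q != pvKey p.2)
    then some [("action", PySem.Str.strip (pvDictGet p.2 "action")),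
               ("target", PySem.Str.strip (pvDictGet p.2 "target"))]
    else none)

-- B's emitting scan: walk steps, splicing `missing` right after the first 'goto';
-- returns none when no 'goto' was seen (then the caller prepends `missing`)
def pvEmit (missing : List (List (String × String))) : List (List (String × String)) → Option (List (List (String × String)))
  | [] => none
  | s :: rest =>
    if PySem.Str.lower (PySem.Str.strip (pvDictGet s "action")) == "goto" then some (s :: (missing ++ rest))
    else (pvEmit missing rest).map (s :: ·)

def inject_required_interactions_py_alt (steps : List (List (String × String))) (required : List (List (String × String))) : List (List (String × String)) :=
  let missing := pvMissing (steps.map pvKey) required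
  match pvEmit missing steps with
  | some out => out
  | none => missing ++ steps

-- ===== PRECONDITION & SPEC =====
def Spec_inject_required_interactions_py (steps : List (List (String × String))) (required : List (List (String × String))) (out : List (List (String × String))) : Prop := out = inject_required_interactions_py_alt steps required
instance (steps : List (List (String × String))) (required : List (List (String × String))) (out : List (List (String × String))) : Decidable (Spec_inject_required_interactions_py steps required out) := by unfold Spec_inject_required_interactions_py; infer_instance

-- ===== CLAIM =====
def Claim_equal_inject_required_interactions_py : Prop := ∀ (steps : List (List (String × String))) (required : List (List (String × String))), Dom_inject_required_interactions_py steps required → Spec_inject_required_interactions_py steps required (inject_required_interactions_py steps required)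

-- ===== LEMMAS AND PROOFS =====

-- Python's strip is idempotent
lemma dropWhile_head_false {α : Type} (p : α → Bool) (l : List α)
    (h : ∀ c ∈ l.head?, p c = false) : l.dropWhile p = l := by
  cases l with
  | nil => rfl
  | cons a t => simp_all [List.dropWhile]

lemma head_dropWhile_false {α : Type} (p : α → Bool) (l : List α) :
    ∀ c ∈ (l.dropWhile p).head?, p c = false := by
  induction l with
  | nil => simp
  | cons a t ih =>
    intro c hc
    by_cases hp : p a
    · simp [List.dropWhile, hp] at hc; exact ih c hc
    · simp [List.dropWhile, hp] at hc; subst hc; simpa using hp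

lemma rstrip_head_false {α : Type} (p : α → Bool) (u : List α)
    (hhead : ∀ c ∈ u.head?, p c = false) :
    ∀ c ∈ ((List.dropWhile p u.reverse).reverse).head?, p c = false := by
  intro c hc
  have hpref : (List.dropWhile p u.reverse).reverse <+: u := by
    have h1 : List.dropWhile p u.reverse <:+ u.reverse := List.dropWhile_suffix p
    simpa using h1.reverse
  obtain ⟨r, hr⟩ := hpref
  apply hhead
  rw [← hr]
  cases h : (List.dropWhile p u.reverse).reverse with
  | nil => rw [h] at hc; simp at hc
  | cons a t' => rw [h] at hc; simp at hc; subst hc; simp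

lemma chars_strip_idem (s : List Char) :
    PySem.Chars.strip (PySem.Chars.strip s) = PySem.Chars.strip s := by
  unfold PySem.Chars.strip PySem.Chars.lstrip PySem.Chars.rstrip
  rw [dropWhile_head_false _ _ (rstrip_head_false _ _ (head_dropWhile_false _ s))]
  simp [List.dropWhile_idempotent]

lemma strip_idem (s : String) : PySem.Str.strip (PySem.Str.strip s) = PySem.Str.strip s := by
  unfold PySem.Str.strip
  simp [chars_strip_idem]

-- the key of a freshly built {"action": a, "target": t} entry (a, t already stripped)
lemma pvKey_new (a t : String) :
    pvKey [("action", PySem.Str.strip a), ("target", PySem.Str.strip t)]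
      = (PySem.Str.lower (PySem.Str.strip a), PySem.Str.strip t) := by
  simp [pvKey, pvDictGet, strip_idem]

lemma stepMatches_eq_key (s : List (String × String)) (a t : String) :
    pvStepMatches s a t = (pvKey s == (PySem.Str.lower a, t)) := rfl

-- A's duplicate scan is a key-membership test
lemma any_key (ns : List (List (String × String))) (k : String × String) :
    (ns.any fun s => pvKey s == k) = decide (k ∈ ns.map pvKey) := by
  induction ns with
  | nil => simp
  | cons s rest ih =>
    simp only [List.any_cons, List.map_cons, List.mem_cons, ih]
    by_cases h : pvKey s = k
    · simp [h]
    · simp [h, Ne.symm h, beq_iff_eq]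

-- the prefix-dedup test of B's comprehension, as the negation of an existence test
lemma all_eq_not_any (P : List (List (String × String))) (k : String × String) :
    (P.all fun q => !pvValid q || pvKey q != k)
      = !(P.any fun q => pvValid q && (pvKey q == k)) := by
  rw [List.not_any_eq_all_not]
  simp [Bool.not_and, bne]

-- proof-side recursion: B's missing list computed with an explicit processed prefix P
def pvG (stepKeys : List (String × String)) (P : List (List (String × String))) :
    List (List (String × String)) → List (List (String × String))
  | [] => []
  | r :: rest =>
    (if pvValid r && !(stepKeys.contains (pvKey r))
        && (P.all fun q => !pvValid q || pvKey q != pvKey r)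
     then [[("action", PySem.Str.strip (pvDictGet r "action")),
            ("target", PySem.Str.strip (pvDictGet r "target"))]]
     else []) ++ pvG stepKeys (P ++ [r]) rest

lemma missing_eq_G_gen (stepKeys : List (String × String)) :
    ∀ (tail P : List (List (String × String))),
    ((PySem.List.enumerate tail (P.length : Int)).filterMap (fun p =>
      if pvValid p.2 && !(stepKeys.contains (pvKey p.2))
          && ((PySem.List.slice (P ++ tail) none (some p.1)).all fun q => !pvValid q || pvKey q != pvKey p.2)
      then some [("action", PySem.Str.strip (pvDictGet p.2 "action")),
                 ("target", PySem.Str.strip (pvDictGet p.2 "target"))]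
      else none))
      = pvG stepKeys P tail := by
  intro tail
  induction tail with
  | nil => intro P; simp [PySem.List.enumerate_nil, pvG]
  | cons r rest ih =>
    intro P
    rw [PySem.List.enumerate_cons, List.filterMap_cons]
    have hlist : P ++ r :: rest = (P ++ [r]) ++ rest := by simp
    have harg : ((P.length : Int) + 1) = (((P ++ [r]).length : Nat) : Int) := by simp
    rw [hlist, harg, ih (P ++ [r])]
    have hslice : PySem.List.slice ((P ++ [r]) ++ rest) none (some ((P.length : Nat) : Int)) = P := by
      rw [PySem.List.slice_to_natCast, List.append_assoc]
      exact List.take_left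
    conv_rhs => rw [pvG]
    by_cases hcond : (pvValid r && !(stepKeys.contains (pvKey r))
        && (P.all fun q => !pvValid q || pvKey q != pvKey r)) = true
    · simp only [hslice, hcond, if_true, List.singleton_append]
    · simp only [hslice, hcond, if_false, Bool.false_eq_true, List.nil_append]

lemma missing_eq_G (stepKeys : List (String × String)) (required : List (List (String × String))) :
    pvMissing stepKeys required = pvG stepKeys [] required := by
  have := missing_eq_G_gen stepKeys required []
  simpa [pvMissing] using this

-- position of the first 'goto' step, if any (proof-side)
def pvGotoIdx? : List (List (String × String)) → Option Nat
  | [] => none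
  | s :: rest =>
    if PySem.Str.lower (PySem.Str.strip (pvDictGet s "action")) == "goto" then some 0
    else (pvGotoIdx? rest).map (· + 1)

lemma findGoto_eq (steps : List (List (String × String))) :
    ∀ idx, pvFindGoto steps idx
      = match pvGotoIdx? steps with
        | some i => idx + i + 1
        | none => 0 := by
  induction steps with
  | nil => intro idx; rfl
  | cons s rest ih =>
    intro idx
    unfold pvFindGoto pvGotoIdx?
    by_cases hg : (PySem.Str.lower (PySem.Str.strip (pvDictGet s "action")) == "goto") = true
    · simp [hg]
    · simp only [hg, if_false, Bool.false_eq_true, ih (idx + 1)]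
      cases h : pvGotoIdx? rest with
      | none => simp
      | some i => simp; omega

lemma findGoto_none (steps : List (List (String × String))) (idx : Nat)
    (h : pvGotoIdx? steps = none) : pvFindGoto steps idx = 0 := by
  rw [findGoto_eq steps idx, h]

lemma findGoto_some (steps : List (List (String × String))) (idx i : Nat)
    (h : pvGotoIdx? steps = some i) : pvFindGoto steps idx = idx + i + 1 := by
  rw [findGoto_eq steps idx, h]

lemma emit_eq (missing : List (List (String × String))) (steps : List (List (String × String))) :
    pvEmit missing steps
      = (pvGotoIdx? steps).map
          (fun i => steps.take (i + 1) ++ missing ++ steps.drop (i + 1)) := by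
  induction steps with
  | nil => rfl
  | cons s rest ih =>
    unfold pvEmit pvGotoIdx?
    by_cases hg : (PySem.Str.lower (PySem.Str.strip (pvDictGet s "action")) == "goto") = true
    · simp [hg]
    · simp only [hg, if_false, Bool.false_eq_true, ih]
      cases h : pvGotoIdx? rest with
      | none => rfl
      | some i => simp

-- the index pvGotoIdx? finds is inside the list
lemma gotoIdx_lt (l : List (List (String × String))) :
    ∀ j, pvGotoIdx? l = some j → j < l.length := by
  induction l with
  | nil => intro j hj; simp [pvGotoIdx?] at hj
  | cons s rest ih =>
    intro j hj
    unfold pvGotoIdx? at hj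
    split at hj
    · simp only [Option.some.injEq] at hj
      subst hj
      simp
    · cases h' : pvGotoIdx? rest with
      | none => rw [h'] at hj; simp at hj
      | some j' =>
        rw [h'] at hj
        simp only [Option.map_some, Option.some.injEq] at hj
        subst hj
        have := ih j' h'
        simp only [List.length_cons]
        omega

-- main invariant: A's loop over required, at insert position |pre| + |ins| inside pre ++ ins ++ suf,
-- appends exactly B's declarative missing list pvG (with processed prefix P) into the middle block
set_option maxHeartbeats 1600000 in
lemma main_inv (stepKeys : List (String × String)) :
    ∀ (required P pre ins suf : List (List (String × String))),
    (∀ k, decide (k ∈ (pre ++ ins ++ suf).map pvKey)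
        = (stepKeys.contains k || P.any (fun q => pvValid q && (pvKey q == k)))) →
    pvInjectLoopA required (pre ++ ins ++ suf) (pre.length + ins.length)
      = pre ++ (ins ++ pvG stepKeys P required) ++ suf := by
  intro required
  induction required with
  | nil => intro P pre ins suf _; simp [pvInjectLoopA, pvG]
  | cons it rest ih =>
    intro P pre ins suf h
    simp only [pvInjectLoopA]
    unfold pvG
    by_cases hv : pvValid it = true
    · -- non-blank entry
      have hblank : (PySem.Str.strip (pvDictGet it "action") == ""
          || PySem.Str.strip (pvDictGet it "target") == "") = false := by
        unfold pvValid at hv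
        cases h1 : (PySem.Str.strip (pvDictGet it "action") == "") <;>
          cases h2 : (PySem.Str.strip (pvDictGet it "target") == "") <;>
          simp_all
      rw [if_neg (by simp [hblank])]
      have hk : (fun step => pvStepMatches step (PySem.Str.strip (pvDictGet it "action"))
            (PySem.Str.strip (pvDictGet it "target")))
          = (fun s => pvKey s == pvKey it) := by
        funext s; exact stepMatches_eq_key s _ _
      have hany : ((pre ++ ins ++ suf).any fun step =>
            pvStepMatches step (PySem.Str.strip (pvDictGet it "action"))
              (PySem.Str.strip (pvDictGet it "target")))
          = (stepKeys.contains (pvKey it)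
              || P.any (fun q => pvValid q && (pvKey q == pvKey it))) := by
        rw [hk, any_key, h]
      by_cases hc : (stepKeys.contains (pvKey it)
          || P.any (fun q => pvValid q && (pvKey q == pvKey it))) = true
      · -- already present (in steps or from an earlier required entry): A skips, pvG emits nothing
        rw [hany, if_pos hc]
        have hcond : (pvValid it && !(stepKeys.contains (pvKey it))
            && (P.all fun q => !pvValid q || pvKey q != pvKey it)) = false := by
          rw [all_eq_not_any]
          cases h1 : stepKeys.contains (pvKey it) <;>
            cases h2 : P.any (fun q => pvValid q && (pvKey q == pvKey it)) <;>
            simp_all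
        rw [hcond]
        simp only [if_false, List.nil_append, Bool.false_eq_true]
        apply ih
        intro k
        by_cases hkk : pvKey it = k
        · subst hkk
          rw [h, hc]
          simp [List.any_append, hv]
        · have h1 : (pvKey it == k) = false := by simp [hkk]
          rw [h]
          simp [List.any_append, h1]
      · -- genuinely missing: A inserts at the cursor, pvG emits the entry
        rw [hany, if_neg hc]
        have hcontains : stepKeys.contains (pvKey it) = false := by
          cases h1 : stepKeys.contains (pvKey it) <;> simp_all
        have hpany : (P.any fun q => pvValid q && (pvKey q == pvKey it)) = false := by
          cases h1 : (P.any fun q => pvValid q && (pvKey q == pvKey it)) <;> simp_all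
        have hcond : (pvValid it && !(stepKeys.contains (pvKey it))
            && (P.all fun q => !pvValid q || pvKey q != pvKey it)) = true := by
          rw [all_eq_not_any, hv, hcontains, hpany]; rfl
        rw [hcond, if_pos rfl]
        have hlen : pre.length + ins.length ≤ (pre ++ ins ++ suf).length := by
          rw [List.length_append, List.length_append]; omega
        rw [PySem.List.insert_natCast _ _ _ hlen]
        have htake : (pre ++ ins ++ suf).take (pre.length + ins.length) = pre ++ ins := by
          have : pre.length + ins.length = (pre ++ ins).length := by simp
          rw [this, List.take_left]
        have hdrop : (pre ++ ins ++ suf).drop (pre.length + ins.length) = suf := by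
          have : pre.length + ins.length = (pre ++ ins).length := by simp
          rw [this, List.drop_left]
        rw [htake, hdrop]
        set e : List (String × String) :=
          [("action", PySem.Str.strip (pvDictGet it "action")),
           ("target", PySem.Str.strip (pvDictGet it "target"))] with he
        have heq : (pre ++ ins) ++ e :: suf = pre ++ (ins ++ [e]) ++ suf := by simp
        have hidx : pre.length + ins.length + 1 = pre.length + (ins ++ [e]).length := by
          simp only [List.length_append, List.length_cons, List.length_nil]
          omega
        rw [heq, hidx]
        have hkey_e : pvKey e = pvKey it := by
          rw [he, pvKey_new]; rfl
        have h' : ∀ k, decide (k ∈ (pre ++ (ins ++ [e]) ++ suf).map pvKey)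
            = (stepKeys.contains k
                || (P ++ [it]).any (fun q => pvValid q && (pvKey q == k))) := by
          intro k
          by_cases hkk : pvKey it = k
          · subst hkk
            have he' : e ∈ pre ++ (ins ++ [e]) ++ suf := by simp
            have hm : pvKey it ∈ (pre ++ (ins ++ [e]) ++ suf).map pvKey := by
              rw [← hkey_e]
              exact List.mem_map_of_mem he'
            rw [decide_eq_true hm]
            simp only [List.any_append, List.any_cons, List.any_nil, hv, Bool.true_and,
              beq_self_eq_true, Bool.or_false, Bool.or_true]
          · have hne : (k = pvKey it) ↔ False := ⟨fun hh => hkk hh.symm, False.elim⟩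
            have hmm : (k ∈ (pre ++ (ins ++ [e]) ++ suf).map pvKey)
                ↔ (k ∈ (pre ++ ins ++ suf).map pvKey) := by
              simp only [List.map_append, List.mem_append, List.map_cons, List.map_nil,
                List.mem_cons, List.not_mem_nil, or_false, hkey_e, hne]
            rw [decide_eq_decide.mpr hmm, h k]
            have h1 : (pvKey it == k) = false := by simp [hkk]
            simp only [List.any_append, List.any_cons, List.any_nil, h1, Bool.and_false,
              Bool.or_false]
        have := ih (P ++ [it]) pre (ins ++ [e]) suf h'
        rw [this]
        simp only [List.append_assoc, List.singleton_append]
    · -- blank entry: both skip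
      have hblank : (PySem.Str.strip (pvDictGet it "action") == ""
          || PySem.Str.strip (pvDictGet it "target") == "") = true := by
        unfold pvValid at hv
        cases h1 : (PySem.Str.strip (pvDictGet it "action") == "") <;>
          cases h2 : (PySem.Str.strip (pvDictGet it "target") == "") <;>
          simp_all
      rw [if_pos (by simp [hblank])]
      have hvf : pvValid it = false := by cases h1 : pvValid it <;> simp_all
      rw [hvf]
      simp only [Bool.false_and, if_false, List.nil_append, Bool.false_eq_true]
      apply ih
      intro k
      rw [h k]
      simp [hvf]

-- ===== VERDICT =====
set_option maxHeartbeats 1600000 in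
theorem inject_required_interactions_py_spec : Claim_equal_inject_required_interactions_py := by
  intro steps required _
  unfold Spec_inject_required_interactions_py inject_required_interactions_py
  simp only [inject_required_interactions_py_alt]
  have hsplit : steps.take (pvFindGoto steps 0) ++ steps.drop (pvFindGoto steps 0) = steps :=
    List.take_append_drop _ _
  have h0 : ∀ k, decide (k ∈ ((steps.take (pvFindGoto steps 0) ++ [] ++ steps.drop (pvFindGoto steps 0)).map pvKey))
      = ((steps.map pvKey).contains k
          || ([] : List (List (String × String))).any (fun q => pvValid q && (pvKey q == k))) := by
    intro k
    rw [List.contains_eq_mem]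
    simp only [List.append_nil, hsplit, List.any_nil, Bool.or_false]
  have hfg : pvFindGoto steps 0 ≤ steps.length := by
    cases h : pvGotoIdx? steps with
    | none => rw [findGoto_none steps 0 h]; omega
    | some i =>
      rw [findGoto_some steps 0 i h]
      have := gotoIdx_lt steps i h
      omega
  have hlen : (steps.take (pvFindGoto steps 0)).length = pvFindGoto steps 0 := by
    simp [Nat.min_eq_left hfg]
  have hres := main_inv (steps.map pvKey) required []
      (steps.take (pvFindGoto steps 0)) [] (steps.drop (pvFindGoto steps 0)) h0
  simp only [List.append_nil, List.nil_append, List.length_nil, Nat.add_zero, hlen, hsplit] at hres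
  rw [hres, missing_eq_G (steps.map pvKey) required, emit_eq]
  cases h : pvGotoIdx? steps with
  | none =>
    rw [findGoto_none steps 0 h]
    simp
  | some i =>
    rw [findGoto_some steps 0 i h]
    simp [List.append_assoc]
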